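-- pv_equiv track=rewrite | github.com/NightsPaladin/exowin3x-patch | generate_win3x_patch.py | backslash_to_forward
-- ===== SOURCE A (Python) =====
-- def backslash_to_forward(conf_text: str) -> str:
--     """Convert backslash path separators to forward slashes in dosbox AUTOEXEC
--     mount/imgmount lines so they work on Linux/macOS."""
--     lines = conf_text.split('\n')
--     in_autoexec = False
--     result = []
--     for line in lines:
--         stripped = line.strip().lower()
--         if stripped == '[autoexec]':
--             in_autoexec = True
--         if in_autoexec and ('mount' in stripped or 'imgmount' in stripped):
--             line = line.replace('\\', '/')
--         result.append(line)
--     return '\n'.join(result)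
-- ===== SOURCE B (Python) =====
-- def backslash_to_forward(conf_text: str) -> str:
--     """Convert backslash path separators to forward slashes in dosbox AUTOEXEC
--     mount/imgmount lines so they work on Linux/macOS."""
--     lines = conf_text.split('\n')
--     try:
--         i = next(k for k, l in enumerate(lines) if l.strip().lower() == '[autoexec]')
--     except StopIteration:
--         i = len(lines)  # no [autoexec] header: nothing after it to convert
--     head = lines[:i + 1]
--     tail = [l.replace('\\', '/') if 'mount' in l.strip().lower() else l
--             for l in lines[i + 1:]]
--     return '\n'.join(head + tail)
-- ===== Notes on version B (the rewrite author's own statement) =====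
-- stated objective: alternative
-- what changed: Replaces A's sticky-flag state machine (one loop carrying an in_autoexec boolean) with a two-phase index-then-map structure: find the index of the first '[autoexec]' header, copy lines up to and including it verbatim, then map the replacement over the tail; the redundant 'imgmount' test is dropped since 'mount' is a substring of 'imgmount'.
import Mathlib
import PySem

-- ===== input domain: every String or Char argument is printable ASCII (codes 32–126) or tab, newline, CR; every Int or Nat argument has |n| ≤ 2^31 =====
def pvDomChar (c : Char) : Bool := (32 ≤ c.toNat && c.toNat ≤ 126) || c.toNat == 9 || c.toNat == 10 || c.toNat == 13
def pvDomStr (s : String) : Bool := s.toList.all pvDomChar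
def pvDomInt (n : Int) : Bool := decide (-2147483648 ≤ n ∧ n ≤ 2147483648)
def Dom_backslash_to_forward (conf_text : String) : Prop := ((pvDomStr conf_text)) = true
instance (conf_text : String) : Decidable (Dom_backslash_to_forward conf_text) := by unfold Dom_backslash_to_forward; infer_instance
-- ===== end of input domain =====

-- B replaces A's sticky-flag loop with an index-then-map two-phase structure (alternative decomposition, same cost).


-- ===== PORT A =====
-- A's loop: sticky in_autoexec flag carried through a single scan, result built forward
def pvALoop : Bool → List String → List String
  | _, [] => []
  | in_autoexec, line :: rest =>
    let stripped := PySem.Str.lower (PySem.Str.strip line)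
    let in_autoexec' := if stripped == "[autoexec]" then true else in_autoexec
    let line' :=
      if in_autoexec' && (PySem.Str.isIn "mount" stripped || PySem.Str.isIn "imgmount" stripped)
      then PySem.Str.replace line "\\" "/" else line
    line' :: pvALoop in_autoexec' rest

def backslash_to_forward (conf_text : String) : String :=
  PySem.Str.join "\n" (pvALoop false ((PySem.Str.split? conf_text "\n").getD []))

-- ===== PORT B =====
def pvIsHeader (l : String) : Bool := PySem.Str.lower (PySem.Str.strip l) == "[autoexec]"

def pvFix (l : String) : String :=
  if PySem.Str.isIn "mount" (PySem.Str.lower (PySem.Str.strip l))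
  then PySem.Str.replace l "\\" "/" else l

def backslash_to_forward_alt (conf_text : String) : String :=
  let lines := (PySem.Str.split? conf_text "\n").getD []
  let i := (lines.findIdx? pvIsHeader).getD lines.length
  PySem.Str.join "\n" (lines.take (i + 1) ++ (lines.drop (i + 1)).map pvFix)

-- ===== PRECONDITION & SPEC =====
def Spec_backslash_to_forward (conf_text : String) (out : String) : Prop := out = backslash_to_forward_alt conf_text
instance (conf_text : String) (out : String) : Decidable (Spec_backslash_to_forward conf_text out) := by unfold Spec_backslash_to_forward; infer_instance

-- ===== CLAIM (what is proved, stated in full; the proofs are below) =====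
def Claim_equal_backslash_to_forward : Prop := ∀ (conf_text : String), Dom_backslash_to_forward conf_text → Spec_backslash_to_forward conf_text (backslash_to_forward conf_text)

-- ===== LEMMAS AND PROOFS =====

-- 'imgmount' contains 'mount', so A's disjunction collapses to B's single test
theorem pv_cond_eq (s : String) :
    (PySem.Str.isIn "mount" s || PySem.Str.isIn "imgmount" s) = PySem.Str.isIn "mount" s := by
  cases h : PySem.Str.isIn "imgmount" s with
  | false => simp [h]
  | true =>
    have hsub : ("mount".toList : List Char) <:+: "imgmount".toList := by decide
    have hi : PySem.Chars.isIn "imgmount".toList s.toList = true := by simpa using h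
    have hm : PySem.Chars.isIn "mount".toList s.toList = true := by
      rw [PySem.Chars.isIn_iff_infix] at hi ⊢
      exact hsub.trans hi
    have hm' : PySem.Chars.isIn ['m','o','u','n','t'] s.toList = true := hm
    simp [hm']

theorem pvALoop_true (ls : List String) : pvALoop true ls = ls.map pvFix := by
  induction ls with
  | nil => rfl
  | cons line rest ih =>
    simp only [pvALoop, ite_self, Bool.true_and, pv_cond_eq, List.map_cons, ih, pvFix]

theorem pvALoop_false (ls : List String) :
    pvALoop false ls =
      (ls.take (((ls.findIdx? pvIsHeader).getD ls.length) + 1)) ++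
      (ls.drop (((ls.findIdx? pvIsHeader).getD ls.length) + 1)).map pvFix := by
  induction ls with
  | nil => rfl
  | cons line rest ih =>
    rw [List.findIdx?_cons]
    by_cases h : pvIsHeader line = true
    · -- header found now: flag turns on; the header line itself is unmodified
      have hstr : PySem.Str.lower (PySem.Str.strip line) = "[autoexec]" := by
        simpa [pvIsHeader] using h
      have hm : PySem.Str.isIn "mount" "[autoexec]" = false := by decide
      have hi : PySem.Str.isIn "imgmount" "[autoexec]" = false := by decide
      simp only [pvALoop, h, hstr, beq_self_eq_true, if_true,
        Bool.true_and, hm, hi, Bool.or_self, Bool.false_eq_true, if_false,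
        pvALoop_true, Option.getD_some, List.take_succ_cons, List.take_zero,
        List.drop_succ_cons, List.drop_zero, List.singleton_append]
    · have h' : pvIsHeader line = false := by simpa using h
      have hstr : (PySem.Str.lower (PySem.Str.strip line) == "[autoexec]") = false := by
        simpa [pvIsHeader] using h'
      cases hf : rest.findIdx? pvIsHeader with
      | none =>
        simp only [pvALoop, hstr, h', Bool.false_eq_true, if_false, Bool.false_and,
          Option.map_none, Option.getD_none, List.length_cons, ih, hf,
          List.take_succ_cons, List.drop_succ_cons, List.cons_append]
      | some j =>
        simp only [pvALoop, hstr, h', Bool.false_eq_true, if_false, Bool.false_and,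
          Option.map_some, Option.getD_some, ih, hf,
          List.take_succ_cons, List.drop_succ_cons, List.cons_append]

-- ===== VERDICT (by name: the statement is the Claim_ definition above) =====
theorem backslash_to_forward_spec : Claim_equal_backslash_to_forward := by
  intro conf_text _
  unfold Spec_backslash_to_forward backslash_to_forward backslash_to_forward_alt
  rw [pvALoop_false]
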